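-- pv_equiv track=rewrite | github.com/Kehn-Marv/Career-plus | backend/app/resume_optimizer.py | format_recommendations_for_prompt
-- ===== SOURCE A (Python) =====
-- from typing import List, Dict, Any
--
-- def format_recommendations_for_prompt(recommendations: List[Dict[str, Any]]) -> str:
--     """
--     Format smart recommendations for inclusion in prompt
--
--     Args:
--         recommendations: List of smart recommendations
--
--     Returns:
--         Formatted string of recommendations
--     """
--     if not recommendations:
--         return "No specific recommendations provided."
--
--     # Group recommendations by priority if available
--     high_priority = []
--     medium_priority = []
--     low_priority = []
--
--     for rec in recommendations:
--         priority = rec.get('priority', 'medium').lower()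
--         rec_type = rec.get('type', 'general')
--         suggested_text = rec.get('suggestedText', rec.get('suggested_text', ''))
--         explanation = rec.get('explanation', '')
--
--         rec_text = f"[{rec_type.upper()}] {suggested_text}"
--         if explanation:
--             rec_text += f"\n   Reason: {explanation}"
--
--         if priority == 'high':
--             high_priority.append(rec_text)
--         elif priority == 'low':
--             low_priority.append(rec_text)
--         else:
--             medium_priority.append(rec_text)
--
--     # Build formatted output
--     formatted_parts = []
--
--     if high_priority:
--         formatted_parts.append("HIGH PRIORITY:")
--         formatted_parts.extend([f"  {i+1}. {rec}" for i, rec in enumerate(high_priority)])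
--
--     if medium_priority:
--         formatted_parts.append("\nMEDIUM PRIORITY:")
--         formatted_parts.extend([f"  {i+1}. {rec}" for i, rec in enumerate(medium_priority)])
--
--     if low_priority:
--         formatted_parts.append("\nLOW PRIORITY:")
--         formatted_parts.extend([f"  {i+1}. {rec}" for i, rec in enumerate(low_priority)])
--
--     return "\n".join(formatted_parts) if formatted_parts else "No specific recommendations provided."
-- ===== SOURCE B (Python) =====
-- def _canon(p):
--     if p == 'high':
--         return 'high'
--     if p == 'low':
--         return 'low'
--     return 'medium'
--
-- def _rec_text(rec):
--     rec_type = rec.get('type', 'general')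
--     suggested_text = rec.get('suggestedText', rec.get('suggested_text', ''))
--     explanation = rec.get('explanation', '')
--     text = f"[{rec_type.upper()}] {suggested_text}"
--     if explanation:
--         text += f"\n   Reason: {explanation}"
--     return text
--
-- def format_recommendations_for_prompt(recommendations):
--     pairs = [(_canon(rec.get('priority', 'medium').lower()), _rec_text(rec))
--              for rec in recommendations]
--     parts = []
--     for header, key in (("HIGH PRIORITY:", "high"),
--                         ("\nMEDIUM PRIORITY:", "medium"),
--                         ("\nLOW PRIORITY:", "low")):
--         texts = [text for canon, text in pairs if canon == key]
--         if texts: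
--             parts.append(header)
--             parts.extend(f"  {i+1}. {text}" for i, text in enumerate(texts))
--     return "\n".join(parts) if parts else "No specific recommendations provided."
-- ===== Notes on version B (the rewrite author's own statement) =====
-- stated objective: alternative
-- what changed: Replaces A's three maintained priority buckets with a single map producing (canonical-priority, text) pairs and a loop over the three fixed (header, key) sections that filters the pair list per section.
import Mathlib
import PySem

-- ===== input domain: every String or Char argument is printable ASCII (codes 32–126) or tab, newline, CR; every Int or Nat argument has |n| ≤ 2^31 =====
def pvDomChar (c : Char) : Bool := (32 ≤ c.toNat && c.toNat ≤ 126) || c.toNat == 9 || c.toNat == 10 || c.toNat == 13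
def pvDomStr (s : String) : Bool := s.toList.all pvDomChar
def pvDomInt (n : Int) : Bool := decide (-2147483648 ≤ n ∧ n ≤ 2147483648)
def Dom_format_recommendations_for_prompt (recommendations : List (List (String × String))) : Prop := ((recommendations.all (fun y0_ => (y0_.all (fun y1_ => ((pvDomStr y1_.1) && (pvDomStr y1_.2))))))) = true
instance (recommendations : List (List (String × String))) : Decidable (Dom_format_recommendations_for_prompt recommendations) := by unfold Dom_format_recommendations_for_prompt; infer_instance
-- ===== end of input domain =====

-- B replaces A's three maintained priority buckets with one map to (canonical priority, text)
-- pairs followed by a fold over the three fixed sections that filters per section (objective: alternative decomposition).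

-- rec.get(k, dflt) on the association-list dict (shared by both ports; exact Python dict.get)
def pvGet (rec : List (String × String)) (k dflt : String) : String :=
  PySem.Dict.getD (PySem.Dict.mk rec) k dflt

-- [f"  {i+1}. {rec}" for i, rec in enumerate(xs)]  (the identical comprehension appears in A and B)
def pvNumber (xs : List String) : List String :=
  (PySem.List.enumerate xs 0).map (fun p => "  " ++ PySem.Int.toStr (p.1 + 1) ++ ". " ++ p.2)

-- ===== PORT A =====
-- A's grouping loop: three accumulated buckets, rec_text built inline
def pvGroupA : List (List (String × String)) → List String → List String → List String →
    (List String × List String × List String)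
  | [], hi, med, lo => (hi, med, lo)
  | rec :: rest, hi, med, lo =>
    let priority := PySem.Str.lower (pvGet rec "priority" "medium")
    let rec_type := pvGet rec "type" "general"
    let suggested_text := pvGet rec "suggestedText" (pvGet rec "suggested_text" "")
    let explanation := pvGet rec "explanation" ""
    let rec_text0 := "[" ++ PySem.Str.upper rec_type ++ "] " ++ suggested_text
    let rec_text := if explanation ≠ "" then rec_text0 ++ "\n   Reason: " ++ explanation else rec_text0
    if priority = "high" then pvGroupA rest (hi ++ [rec_text]) med lo
    else if priority = "low" then pvGroupA rest hi med (lo ++ [rec_text])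
    else pvGroupA rest hi (med ++ [rec_text]) lo

def format_recommendations_for_prompt (recommendations : List (List (String × String))) : String :=
  if recommendations = [] then "No specific recommendations provided."
  else
    let g := pvGroupA recommendations [] [] []
    let high_priority := g.1
    let medium_priority := g.2.1
    let low_priority := g.2.2
    let formatted_parts :=
      (if high_priority ≠ [] then "HIGH PRIORITY:" :: pvNumber high_priority else []) ++
      (if medium_priority ≠ [] then "\nMEDIUM PRIORITY:" :: pvNumber medium_priority else []) ++
      (if low_priority ≠ [] then "\nLOW PRIORITY:" :: pvNumber low_priority else [])
    if formatted_parts ≠ [] then PySem.Str.join "\n" formatted_parts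
    else "No specific recommendations provided."

-- ===== PORT B =====
def pvCanon (p : String) : String :=
  if p = "high" then "high" else if p = "low" then "low" else "medium"

def pvRecText (rec : List (String × String)) : String :=
  let rec_type := pvGet rec "type" "general"
  let suggested_text := pvGet rec "suggestedText" (pvGet rec "suggested_text" "")
  let explanation := pvGet rec "explanation" ""
  let text := "[" ++ PySem.Str.upper rec_type ++ "] " ++ suggested_text
  if explanation ≠ "" then text ++ "\n   Reason: " ++ explanation else text

def pvPairs (recommendations : List (List (String × String))) : List (String × String) :=
  recommendations.map (fun rec =>
    (pvCanon (PySem.Str.lower (pvGet rec "priority" "medium")), pvRecText rec))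

def format_recommendations_for_prompt_alt (recommendations : List (List (String × String))) : String :=
  let pairs := pvPairs recommendations
  let parts :=
    [("HIGH PRIORITY:", "high"), ("\nMEDIUM PRIORITY:", "medium"), ("\nLOW PRIORITY:", "low")].foldl
      (fun parts hk =>
        let texts := (pairs.filter (fun p => p.1 = hk.2)).map Prod.snd
        if texts ≠ [] then parts ++ hk.1 :: pvNumber texts else parts) []
  if parts ≠ [] then PySem.Str.join "\n" parts else "No specific recommendations provided."

-- ===== PRECONDITION & SPEC =====
def Spec_format_recommendations_for_prompt (recommendations : List (List (String × String))) (out : String) : Prop := out = format_recommendations_for_prompt_alt recommendations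
instance (recommendations : List (List (String × String))) (out : String) : Decidable (Spec_format_recommendations_for_prompt recommendations out) := by unfold Spec_format_recommendations_for_prompt; infer_instance

-- ===== CLAIM (what is proved, stated in full; the proofs are below) =====
def Claim_equal_format_recommendations_for_prompt : Prop := ∀ (recommendations : List (List (String × String))), Dom_format_recommendations_for_prompt recommendations → Spec_format_recommendations_for_prompt recommendations (format_recommendations_for_prompt recommendations)

-- ===== LEMMAS AND PROOFS =====

theorem pvGroupA_eq (recs : List (List (String × String))) :
    ∀ hi med lo, pvGroupA recs hi med lo =
      (hi ++ ((pvPairs recs).filter (fun p => p.1 = "high")).map Prod.snd,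
       med ++ ((pvPairs recs).filter (fun p => p.1 = "medium")).map Prod.snd,
       lo ++ ((pvPairs recs).filter (fun p => p.1 = "low")).map Prod.snd) := by
  induction recs with
  | nil => intro hi med lo; simp [pvGroupA, pvPairs]
  | cons rec rest ih =>
    intro hi med lo
    by_cases h1 : PySem.Str.lower (pvGet rec "priority" "medium") = "high"
    · simp [pvGroupA, pvPairs, h1, ih, pvCanon, pvRecText]
    · by_cases h2 : PySem.Str.lower (pvGet rec "priority" "medium") = "low"
      · simp [pvGroupA, pvPairs, h2, ih, pvCanon, pvRecText]
      · simp [pvGroupA, pvPairs, h1, h2, ih, pvCanon, pvRecText]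

-- ===== VERDICT (by name: the statement is the Claim_ definition above) =====
theorem format_recommendations_for_prompt_spec : Claim_equal_format_recommendations_for_prompt := by
  intro recs _
  unfold Spec_format_recommendations_for_prompt format_recommendations_for_prompt
    format_recommendations_for_prompt_alt
  by_cases h : recs = []
  · subst h; simp [pvPairs]
  · simp only [h, if_false, pvGroupA_eq, List.nil_append, List.foldl, List.append_assoc]
    generalize (List.map Prod.snd (List.filter (fun p => decide (p.1 = "high")) (pvPairs recs))) = H
    generalize (List.map Prod.snd (List.filter (fun p => decide (p.1 = "medium")) (pvPairs recs))) = M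
    generalize (List.map Prod.snd (List.filter (fun p => decide (p.1 = "low")) (pvPairs recs))) = L
    rcases H with _ | ⟨h1, H⟩ <;> rcases M with _ | ⟨m1, M⟩ <;> rcases L with _ | ⟨l1, L⟩ <;> simp
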